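-- pv_equiv track=rewrite | github.com/Ranjithkumar0203/AngularPythonFastApiChatLLM | backend/api/endpoints/rag.py | _pick_embedding_model
-- ===== SOURCE A (Python) =====
-- from collections.abc import Iterable
--
-- def _normalize_model_name(name: str) -> str:
--     return name.split(":", 1)[0].strip().lower()
--
-- def _pick_embedding_model(available_models: Iterable[str], requested_model: str) -> str | None:
--     available = [model for model in available_models if model]
--     if not available:
--         return None
--
--     requested_normalized = _normalize_model_name(requested_model)
--     for model in available:
--         if _normalize_model_name(model) == requested_normalized:
--             return model
--
--     preferred = ("all-minilm", "mxbai-embed-large", "nomic-embed-text")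
--     for candidate in preferred:
--         for model in available:
--             if _normalize_model_name(model) == candidate:
--                 return model
--
--     for model in available:
--         normalized = _normalize_model_name(model)
--         if "embed" in normalized or "minilm" in normalized:
--             return model
--
--     return None
-- ===== SOURCE B (Python) =====
-- def _normalize_model_name(name: str) -> str:
--     return name.split(":", 1)[0].strip().lower()
--
-- def _pick_embedding_model(available_models, requested_model):
--     requested_normalized = _normalize_model_name(requested_model)
--     preferred = ("all-minilm", "mxbai-embed-large", "nomic-embed-text")
--     exact = None       # first exact match
--     best_pref = None   # (preferred index, model), smallest index, earliest wins
--     sub = None         # first substring ("embed"/"minilm") match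
--     for model in available_models:
--         if not model:
--             continue
--         normalized = _normalize_model_name(model)
--         if exact is None and normalized == requested_normalized:
--             exact = model
--         if normalized in preferred:
--             j = preferred.index(normalized)
--             if best_pref is None or j < best_pref[0]:
--                 best_pref = (j, model)
--         if sub is None and ("embed" in normalized or "minilm" in normalized):
--             sub = model
--     if exact is not None:
--         return exact
--     if best_pref is not None:
--         return best_pref[1]
--     return sub
-- ===== Notes on version B (the rewrite author's own statement) =====
-- stated objective: faster
-- what changed: B replaces A's filter-then-three-sequential-early-return scans (exact match, candidate-major preferred scan, substring scan) by a single pass keeping three accumulators: first exact match, best preferred match (minimal preferred index, earliest wins), first substring match, combined by priority at the end; each model is normalized once instead of once per scan.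
import Mathlib
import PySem

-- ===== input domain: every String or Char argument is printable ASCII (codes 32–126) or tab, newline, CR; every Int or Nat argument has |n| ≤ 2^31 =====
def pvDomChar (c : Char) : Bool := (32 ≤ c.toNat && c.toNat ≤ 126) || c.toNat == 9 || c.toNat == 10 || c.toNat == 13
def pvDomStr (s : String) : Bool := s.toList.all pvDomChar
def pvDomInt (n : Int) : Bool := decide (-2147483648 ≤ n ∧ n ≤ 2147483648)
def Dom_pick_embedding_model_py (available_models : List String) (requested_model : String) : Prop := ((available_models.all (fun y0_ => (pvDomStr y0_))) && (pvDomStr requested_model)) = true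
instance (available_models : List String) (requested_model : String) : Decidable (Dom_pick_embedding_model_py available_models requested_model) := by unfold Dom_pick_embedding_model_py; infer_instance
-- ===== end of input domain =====

-- B replaces A's three sequential early-return scans by a single pass keeping three
-- accumulators (first exact match, best preferred match, first substring match); same result.

-- name.split(":", 1)[0].strip().lower()
def pvNorm (s : String) : String :=
  PySem.Str.lower (PySem.Str.strip (((PySem.Str.splitMax? s ":" 1).getD []).headD ""))

def pvPreferred : List String := ["all-minilm", "mxbai-embed-large", "nomic-embed-text"]

-- [model for model in available_models if model]
def pvFilt (l : List String) : List String := l.filter (fun m => !(m == ""))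

-- ===== PORT A =====
def pick_embedding_model_py (available_models : List String) (requested_model : String) : Option String :=
  let available := pvFilt available_models
  if available == [] then none
  else
    let rn := pvNorm requested_model
    match available.find? (fun m => pvNorm m == rn) with
    | some m => some m
    | none =>
      match pvPreferred.findSome? (fun c => available.find? (fun m => pvNorm m == c)) with
      | some m => some m
      | none =>
        available.find? (fun m => PySem.Str.isIn "embed" (pvNorm m) || PySem.Str.isIn "minilm" (pvNorm m))

-- ===== PORT B =====
-- one loop body: update (exact, best_pref, sub) for one model
def pvStepB (rn : String) (st : Option String × Option (Nat × String) × Option String)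
    (model : String) : Option String × Option (Nat × String) × Option String :=
  if model == "" then st else
  let n := pvNorm model
  ( (if st.1.isNone && (n == rn) then some model else st.1),
    (match PySem.List.index? pvPreferred n with
     | some j =>
       match st.2.1 with
       | none => some (j, model)
       | some (bj, bm) => if j < bj then some (j, model) else some (bj, bm)
     | none => st.2.1),
    (if st.2.2.isNone && (PySem.Str.isIn "embed" n || PySem.Str.isIn "minilm" n) then some model else st.2.2) )

def pick_embedding_model_py_alt (available_models : List String) (requested_model : String) : Option String :=
  let rn := pvNorm requested_model
  let st := available_models.foldl (pvStepB rn) (none, none, none)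
  match st.1 with
  | some m => some m
  | none =>
    match st.2.1 with
    | some (_, m) => some m
    | none => st.2.2

-- ===== PRECONDITION & SPEC =====
def Spec_pick_embedding_model_py (available_models : List String) (requested_model : String) (out : Option String) : Prop := out = pick_embedding_model_py_alt available_models requested_model
instance (available_models : List String) (requested_model : String) (out : Option String) : Decidable (Spec_pick_embedding_model_py available_models requested_model out) := by unfold Spec_pick_embedding_model_py; infer_instance

-- ===== CLAIM (what is proved, stated in full; the proofs are below) =====
def Claim_equal_pick_embedding_model_py : Prop := ∀ (available_models : List String) (requested_model : String), Dom_pick_embedding_model_py available_models requested_model → Spec_pick_embedding_model_py available_models requested_model (pick_embedding_model_py available_models requested_model)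

-- ===== LEMMAS AND PROOFS =====

-- componentwise views of pvStepB
def pvSub (m : String) : Bool :=
  PySem.Str.isIn "embed" (pvNorm m) || PySem.Str.isIn "minilm" (pvNorm m)

def pvStepE (rn : String) (e : Option String) (model : String) : Option String :=
  if model == "" then e else
  if e.isNone && (pvNorm model == rn) then some model else e

def pvStepP (b : Option (Nat × String)) (model : String) : Option (Nat × String) :=
  if model == "" then b else
  match PySem.List.index? pvPreferred (pvNorm model) with
  | some j =>
    match b with
    | none => some (j, model)
    | some (bj, bm) => if j < bj then some (j, model) else some (bj, bm)
  | none => b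

def pvStepS (s : Option String) (model : String) : Option String :=
  if model == "" then s else
  if s.isNone && pvSub model then some model else s

theorem pvStepB_eq (rn : String) (e : Option String) (b : Option (Nat × String)) (s : Option String) (x : String) :
    pvStepB rn (e, b, s) x = (pvStepE rn e x, pvStepP b x, pvStepS s x) := by
  by_cases h : x = "" <;> simp [pvStepB, pvStepE, pvStepP, pvStepS, pvSub, h]

theorem foldl_stepB (rn : String) (l : List String) (e : Option String) (b : Option (Nat × String)) (s : Option String) :
    l.foldl (pvStepB rn) (e, b, s) = (l.foldl (pvStepE rn) e, l.foldl pvStepP b, l.foldl pvStepS s) := by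
  induction l generalizing e b s with
  | nil => rfl
  | cons x t ih => simp only [List.foldl_cons, pvStepB_eq, ih]

theorem foldl_stepE_some (rn : String) (l : List String) (m : String) :
    l.foldl (pvStepE rn) (some m) = some m := by
  induction l with
  | nil => rfl
  | cons x t ih => simp [List.foldl_cons, pvStepE, ih]

theorem foldl_stepE_none (rn : String) (l : List String) :
    l.foldl (pvStepE rn) none = (pvFilt l).find? (fun m => pvNorm m == rn) := by
  induction l with
  | nil => rfl
  | cons x t ih =>
    by_cases h : x = ""
    · simp [List.foldl_cons, pvStepE, pvFilt, h, ih]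
    · by_cases hp : pvNorm x = rn
      · simp [List.foldl_cons, pvStepE, pvFilt, h, hp, foldl_stepE_some]
      · simp [List.foldl_cons, pvStepE, pvFilt, h, hp, ih]

theorem foldl_stepS_some (l : List String) (m : String) :
    l.foldl pvStepS (some m) = some m := by
  induction l with
  | nil => rfl
  | cons x t ih => simp [List.foldl_cons, pvStepS, ih]

theorem foldl_stepS_none (l : List String) :
    l.foldl pvStepS none = (pvFilt l).find? pvSub := by
  induction l with
  | nil => rfl
  | cons x t ih =>
    by_cases h : x = ""
    · simp [List.foldl_cons, pvStepS, pvFilt, h, ih]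
    · by_cases hp : pvSub x = true
      · simp [List.foldl_cons, pvStepS, pvFilt, h, hp, foldl_stepS_some]
      · simp [List.foldl_cons, pvStepS, pvFilt, h, hp, ih]

-- best-preferred machinery
def pvMerge (a y : Option (Nat × String)) : Option (Nat × String) :=
  match y with
  | none => a
  | some (j, m) =>
    match a with
    | none => some (j, m)
    | some (bj, bm) => if j < bj then some (j, m) else some (bj, bm)

def pvKey (x : String) : Option (Nat × String) :=
  if x == "" then none else (PySem.List.index? pvPreferred (pvNorm x)).map (fun j => (j, x))

theorem pvStepP_eq (b : Option (Nat × String)) (x : String) : pvStepP b x = pvMerge b (pvKey x) := by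
  by_cases h : x = ""
  · simp [pvStepP, pvKey, pvMerge, h]
  · simp only [pvStepP, pvKey, h]
    cases PySem.List.index? pvPreferred (pvNorm x) <;> cases b <;> simp [pvMerge, h]

theorem pvMerge_none_left (y : Option (Nat × String)) : pvMerge none y = y := by
  rcases y with _ | ⟨j, m⟩ <;> rfl

theorem pvMerge_assoc (a y z : Option (Nat × String)) :
    pvMerge (pvMerge a y) z = pvMerge a (pvMerge y z) := by
  rcases a with _ | ⟨aj, am⟩ <;> rcases y with _ | ⟨yj, ym⟩ <;> rcases z with _ | ⟨zj, zm⟩ <;>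
    simp only [pvMerge] <;> split_ifs <;> simp only [pvMerge] <;> split_ifs <;>
    first | rfl | (exfalso; omega)

theorem foldl_stepP_merge (l : List String) (b : Option (Nat × String)) :
    l.foldl pvStepP b = pvMerge b (l.foldl pvStepP none) := by
  induction l generalizing b with
  | nil => cases b <;> rfl
  | cons x t ih =>
    simp only [List.foldl_cons, pvStepP_eq]
    rw [ih, ih (pvMerge none (pvKey x)), ← pvMerge_assoc]
    rcases pvKey x with _ | ⟨j, m⟩ <;> rfl

def pvBestDef (l : List String) : Option (Nat × String) :=
  match (pvFilt l).find? (fun m => pvNorm m == "all-minilm") with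
  | some m => some (0, m)
  | none =>
    match (pvFilt l).find? (fun m => pvNorm m == "mxbai-embed-large") with
    | some m => some (1, m)
    | none => ((pvFilt l).find? (fun m => pvNorm m == "nomic-embed-text")).map (fun m => (2, m))

theorem pvKey_empty (x : String) (h : x = "") : pvKey x = none := by simp [pvKey, h]
theorem pvKey_c0 (x : String) (h : ¬ x = "") (h0 : pvNorm x = "all-minilm") :
    pvKey x = some (0, x) := by simp [pvKey, h, h0]; decide
theorem pvKey_c1 (x : String) (h : ¬ x = "") (h1 : pvNorm x = "mxbai-embed-large") :
    pvKey x = some (1, x) := by simp [pvKey, h, h1]; decide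
theorem pvKey_c2 (x : String) (h : ¬ x = "") (h2 : pvNorm x = "nomic-embed-text") :
    pvKey x = some (2, x) := by simp [pvKey, h, h2]; decide
theorem pvKey_skip (x : String) (h : ¬ x = "")
    (h0 : ¬ pvNorm x = "all-minilm") (h1 : ¬ pvNorm x = "mxbai-embed-large")
    (h2 : ¬ pvNorm x = "nomic-embed-text") : pvKey x = none := by
  simp [pvKey, h, pvPreferred, h0, h1, h2]

theorem pvFilt_cons_empty (x : String) (t : List String) (h : x = "") :
    pvFilt (x :: t) = pvFilt t := by simp [pvFilt, h]
theorem pvFilt_cons (x : String) (t : List String) (h : ¬ x = "") :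
    pvFilt (x :: t) = x :: pvFilt t := by simp [pvFilt, h]

theorem foldl_stepP_none (l : List String) : l.foldl pvStepP none = pvBestDef l := by
  induction l with
  | nil => rfl
  | cons x t ih =>
    rw [List.foldl_cons, pvStepP_eq, foldl_stepP_merge, pvMerge_none_left, ih]
    by_cases h : x = ""
    · rw [pvKey_empty x h, pvMerge_none_left]
      unfold pvBestDef
      rw [pvFilt_cons_empty x t h]
    · by_cases h0 : pvNorm x = "all-minilm"
      · rw [pvKey_c0 x h h0]
        unfold pvBestDef
        rw [pvFilt_cons x t h, List.find?_cons_of_pos (by simp [h0])]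
        rcases hf0 : (pvFilt t).find? (fun m => pvNorm m == "all-minilm") with _ | m0 <;>
        rcases hf1 : (pvFilt t).find? (fun m => pvNorm m == "mxbai-embed-large") with _ | m1 <;>
        rcases hf2 : (pvFilt t).find? (fun m => pvNorm m == "nomic-embed-text") with _ | m2 <;>
          simp only [hf0, hf1, hf2] <;> simp [pvMerge]
      · by_cases h1 : pvNorm x = "mxbai-embed-large"
        · rw [pvKey_c1 x h h1]
          unfold pvBestDef
          rw [pvFilt_cons x t h, List.find?_cons_of_neg (by simp [h1]),
              List.find?_cons_of_pos (p := fun m => pvNorm m == "mxbai-embed-large") (by simp [h1])]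
          rcases hf0 : (pvFilt t).find? (fun m => pvNorm m == "all-minilm") with _ | m0 <;>
          rcases hf1 : (pvFilt t).find? (fun m => pvNorm m == "mxbai-embed-large") with _ | m1 <;>
          rcases hf2 : (pvFilt t).find? (fun m => pvNorm m == "nomic-embed-text") with _ | m2 <;>
            simp only [hf0, hf1, hf2] <;> simp [pvMerge]
        · by_cases h2 : pvNorm x = "nomic-embed-text"
          · rw [pvKey_c2 x h h2]
            unfold pvBestDef
            rw [pvFilt_cons x t h, List.find?_cons_of_neg (by simp [h2]),
                List.find?_cons_of_neg (p := fun m => pvNorm m == "mxbai-embed-large") (by simp [h2]),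
                List.find?_cons_of_pos (p := fun m => pvNorm m == "nomic-embed-text") (by simp [h2])]
            rcases hf0 : (pvFilt t).find? (fun m => pvNorm m == "all-minilm") with _ | m0 <;>
            rcases hf1 : (pvFilt t).find? (fun m => pvNorm m == "mxbai-embed-large") with _ | m1 <;>
            rcases hf2 : (pvFilt t).find? (fun m => pvNorm m == "nomic-embed-text") with _ | m2 <;>
              simp only [hf0, hf1, hf2] <;> simp [pvMerge]
          · rw [pvKey_skip x h h0 h1 h2, pvMerge_none_left]
            unfold pvBestDef
            rw [pvFilt_cons x t h, List.find?_cons_of_neg (by simp [h0]),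
                List.find?_cons_of_neg (p := fun m => pvNorm m == "mxbai-embed-large") (by simp [h1]),
                List.find?_cons_of_neg (p := fun m => pvNorm m == "nomic-embed-text") (by simp [h2])]

-- ===== VERDICT (by name: the statement is the Claim_ definition above) =====
theorem pick_embedding_model_py_spec : Claim_equal_pick_embedding_model_py := by
  intro avail req _
  unfold Spec_pick_embedding_model_py
  simp only [pick_embedding_model_py, pick_embedding_model_py_alt]
  rw [foldl_stepB, foldl_stepE_none, foldl_stepS_none, foldl_stepP_none]
  by_cases hnil : pvFilt avail = []
  · rw [hnil]
    simp [pvBestDef, hnil]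
  · rw [if_neg (by simp [hnil])]
    unfold pvBestDef
    simp only [pvPreferred, List.findSome?_cons, List.findSome?_nil]
    rcases hfe : (pvFilt avail).find? (fun m => pvNorm m == pvNorm req) with _ | me <;>
    rcases hf0 : (pvFilt avail).find? (fun m => pvNorm m == "all-minilm") with _ | m0 <;>
    rcases hf1 : (pvFilt avail).find? (fun m => pvNorm m == "mxbai-embed-large") with _ | m1 <;>
    rcases hf2 : (pvFilt avail).find? (fun m => pvNorm m == "nomic-embed-text") with _ | m2 <;>
      simp only [hfe, hf0, hf1, hf2] <;> simp [pvSub] <;> try rfl
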